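-- pv_equiv track=rewrite | github.com/BuzyU/AI-powered-BI-Platform | backend/app/layers/l2_classification/role_detector.py | detect_entities
-- ===== SOURCE A (Python) =====
-- from typing import Dict, Any, List, Tuple, Optional
--
-- def detect_entities(columns: List[str]) -> List[str]:
--     """Detect entity types present in columns."""
--     entity_patterns = {
--         "customer": ["customer", "client", "buyer", "account", "user"],
--         "product": ["product", "item", "sku", "goods"],
--         "service": ["service"],
--         "order": ["order", "transaction", "sale", "invoice"],
--         "ticket": ["ticket", "case", "support"],
--         "feedback": ["feedback", "review", "rating"],
--     }
--
--     detected = []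
--     for entity, patterns in entity_patterns.items():
--         for pattern in patterns:
--             for col in columns:
--                 if pattern in col:
--                     if entity not in detected:
--                         detected.append(entity)
--                     break
--
--     return detected
-- ===== SOURCE B (Python) =====
-- def detect_entities(columns):
--     """Detect entity types present in columns (substring-hash index: enumerate
--     substrings of each column whose length matches some pattern length and look
--     them up in a pattern->entity dict, instead of testing each pattern with 'in')."""
--     entity_order = ["customer", "product", "service", "order", "ticket", "feedback"]
--     pattern_to_entity = {
--         "customer": "customer", "client": "customer", "buyer": "customer",
--         "account": "customer", "user": "customer",
--         "product": "product", "item": "product", "sku": "product", "goods": "product",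
--         "service": "service",
--         "order": "order", "transaction": "order", "sale": "order", "invoice": "order",
--         "ticket": "ticket", "case": "ticket", "support": "ticket",
--         "feedback": "feedback", "review": "feedback", "rating": "feedback",
--     }
--     lengths = sorted({len(p) for p in pattern_to_entity})
--     matched = set()
--     for col in columns:
--         n = len(col)
--         for i in range(n):
--             for L in lengths:
--                 if i + L > n:
--                     break
--                 e = pattern_to_entity.get(col[i:i + L])
--                 if e is not None:
--                     matched.add(e)
--     return [e for e in entity_order if e in matched]
-- ===== Notes on version B (the rewrite author's own statement) =====
-- stated objective: alternative
-- what changed: Replaces A's pattern-by-pattern substring scans with a substring-hash index: an inverted pattern->entity dict is built once, each column's substrings of the (sorted, deduplicated) pattern lengths are enumerated and looked up in the dict, matched entities are collected in a set, and the result is emitted by a separate ordered pass over the entity list.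
import Mathlib
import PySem

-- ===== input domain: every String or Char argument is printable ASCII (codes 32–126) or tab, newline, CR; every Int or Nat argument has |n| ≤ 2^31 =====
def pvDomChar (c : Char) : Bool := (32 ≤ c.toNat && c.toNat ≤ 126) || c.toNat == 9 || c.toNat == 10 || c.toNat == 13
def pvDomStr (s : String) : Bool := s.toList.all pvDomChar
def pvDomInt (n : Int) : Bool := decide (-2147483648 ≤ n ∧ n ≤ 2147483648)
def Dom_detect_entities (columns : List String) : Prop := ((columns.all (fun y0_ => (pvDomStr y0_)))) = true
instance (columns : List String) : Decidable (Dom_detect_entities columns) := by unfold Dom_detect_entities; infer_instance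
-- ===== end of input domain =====

-- B replaces A's pattern-by-pattern substring scans with a substring-hash index:
-- an inverted pattern->entity dict, lookup of each column's substrings of the
-- relevant lengths into a matched set, then a separate ordered output pass.


-- ===== PORT A =====
-- the module-literal entity_patterns dict, in insertion order
def aEntityPatterns : List (String × List String) :=
  [("customer", ["customer", "client", "buyer", "account", "user"]),
   ("product", ["product", "item", "sku", "goods"]),
   ("service", ["service"]),
   ("order", ["order", "transaction", "sale", "invoice"]),
   ("ticket", ["ticket", "case", "support"]),
   ("feedback", ["feedback", "review", "rating"])]

-- 'for col in columns: if pattern in col: … break' — scan columns until the first hit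
def aColsHit (pattern : String) : List String → Bool
  | [] => false
  | c :: cs => if PySem.Str.isIn pattern c then true else aColsHit pattern cs

-- 'for pattern in patterns: …' with the append-if-absent body
def aPatternLoop (entity : String) (columns : List String)
    (patterns : List String) (detected : List String) : List String :=
  patterns.foldl
    (fun det p =>
      if aColsHit p columns then (if det.contains entity then det else det ++ [entity]) else det)
    detected

def detect_entities (columns : List String) : List String :=
  aEntityPatterns.foldl (fun det ep => aPatternLoop ep.1 columns ep.2 det) []

-- ===== PORT B =====
-- the entity_order list literal
def bEntityOrder : List String := ["customer", "product", "service", "order", "ticket", "feedback"]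

-- the inverted pattern->entity dict literal; keys kept as code-point lists
-- (string facts are proved on the List Char side; the dict lookup is exact)
def bPatternToEntity : PySem.Dict (List Char) String :=
  PySem.Dict.ofList
    [("customer".toList, "customer"), ("client".toList, "customer"), ("buyer".toList, "customer"),
     ("account".toList, "customer"), ("user".toList, "customer"),
     ("product".toList, "product"), ("item".toList, "product"), ("sku".toList, "product"),
     ("goods".toList, "product"),
     ("service".toList, "service"),
     ("order".toList, "order"), ("transaction".toList, "order"), ("sale".toList, "order"),
     ("invoice".toList, "order"),
     ("ticket".toList, "ticket"), ("case".toList, "ticket"), ("support".toList, "ticket"),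
     ("feedback".toList, "feedback"), ("review".toList, "feedback"), ("rating".toList, "feedback")]

-- 'lengths = sorted({len(p) for p in pattern_to_entity})'
def bLengths : List Int :=
  PySem.List.sorted (PySem.Set.ofList (bPatternToEntity.keys.map (fun k => (k.length : Int))))
    (fun x => x) false

-- 'for L in lengths: if i + L > n: break; e = pattern_to_entity.get(col[i:i+L]); if e is not None: matched.add(e)'
def bInner (s : List Char) (n i : Int) (m : PySem.Set String) : List Int → PySem.Set String
  | [] => m
  | L :: Ls =>
    if n < i + L then m
    else
      match PySem.Dict.get? bPatternToEntity (PySem.List.slice s (some i) (some (i + L))) with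
      | some e => bInner s n i (PySem.Set.add m e) Ls
      | none => bInner s n i m Ls

-- the body of 'for col in columns': n = len(col); for i in range(n): …
def bScanCol (m : PySem.Set String) (col : String) : PySem.Set String :=
  let s := col.toList
  let n : Int := (s.length : Int)
  (PySem.List.pyRange 0 n).foldl (fun m i => bInner s n i m bLengths) m

def detect_entities_alt (columns : List String) : List String :=
  let matched : PySem.Set String := columns.foldl bScanCol PySem.Set.empty
  bEntityOrder.filter (fun e => PySem.Set.contains matched e)

-- ===== PRECONDITION & SPEC =====
def Spec_detect_entities (columns : List String) (out : List String) : Prop := out = detect_entities_alt columns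
instance (columns : List String) (out : List String) : Decidable (Spec_detect_entities columns out) := by unfold Spec_detect_entities; infer_instance

-- ===== CLAIM (what is proved, stated in full; the proofs are below) =====
def Claim_equal_detect_entities : Prop := ∀ (columns : List String), Dom_detect_entities columns → Spec_detect_entities columns (detect_entities columns)

-- ===== LEMMAS AND PROOFS =====

-- A's innermost column scan is an 'any' over the columns
theorem aColsHit_eq_any (p : String) (cols : List String) :
    aColsHit p cols = cols.any (fun c => PySem.Str.isIn p c) := by
  induction cols with
  | nil => rfl
  | cons c cs ih =>
    rw [aColsHit]
    split_ifs with h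
    · simp only [List.any_cons, h, Bool.true_or]
    · have hf : PySem.Str.isIn p c = false := by simpa using h
      simp only [List.any_cons, hf, Bool.false_or, ih]

-- once the entity is in detected, A's pattern loop is a no-op
theorem aPatternLoop_mem (e : String) (cols ps det : List String)
    (h : e ∈ det) : aPatternLoop e cols ps det = det := by
  induction ps with
  | nil => rfl
  | cons p ps ih =>
    simp only [aPatternLoop, List.foldl_cons] at ih ⊢
    split_ifs with h1 h2
    · exact ih
    · simp_all
    · exact ih

-- if the entity is absent, A's pattern loop appends it iff some pattern hits some column
theorem aPatternLoop_not_mem (e : String) (cols ps det : List String)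
    (h : e ∉ det) :
    aPatternLoop e cols ps det =
      if ps.any (fun p => aColsHit p cols) then det ++ [e] else det := by
  induction ps with
  | nil => simp [aPatternLoop]
  | cons p ps ih =>
    simp only [aPatternLoop, List.foldl_cons] at ih ⊢
    by_cases hp : aColsHit p cols = true
    · rw [if_pos hp, if_neg (by simpa using h)]
      have hm := aPatternLoop_mem e cols ps (det ++ [e]) (by simp)
      simp only [aPatternLoop] at hm
      rw [hm, List.any_cons, hp]
      simp
    · simp only [Bool.not_eq_true] at hp
      rw [if_neg (by simp [hp]), ih, List.any_cons, hp]
      simp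

-- A's entity loop appends, in order, the names of the entries whose condition fires
theorem aFold_eq (cols : List String) (entries : List (String × List String))
    (det : List String)
    (hdet : ∀ ep ∈ entries, ep.1 ∉ det)
    (hdist : entries.Pairwise (fun x y => x.1 ≠ y.1)) :
    entries.foldl (fun det ep => aPatternLoop ep.1 cols ep.2 det) det =
      det ++ (entries.filter (fun ep => ep.2.any (fun p => aColsHit p cols))).map Prod.fst := by
  induction entries generalizing det with
  | nil => simp
  | cons ep rest ih =>
    rcases List.pairwise_cons.mp hdist with ⟨hne, hrest⟩
    have hd : ep.1 ∉ det := hdet ep List.mem_cons_self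
    simp only [List.foldl_cons]
    rw [aPatternLoop_not_mem ep.1 cols ep.2 det hd]
    by_cases hc : ep.2.any (fun p => aColsHit p cols) = true
    · have hdet' : ∀ q ∈ rest, q.1 ∉ det ++ [ep.1] := by
        intro q hq
        have h1 := hdet q (List.mem_cons_of_mem _ hq)
        have h2 : q.1 ≠ ep.1 := fun hh => hne q hq hh.symm
        simp [h1, h2]
      rw [if_pos hc, ih (det ++ [ep.1]) hdet' hrest]
      simp [hc]
    · simp only [Bool.not_eq_true] at hc
      rw [if_neg (by simp [hc]), ih det (fun q hq => hdet q (List.mem_cons_of_mem _ hq)) hrest]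
      simp [hc]

-- the runtime-computed length table, evaluated
theorem bLengths_eq : bLengths = [3, 4, 5, 6, 7, 8, 11] := by decide

-- every key of the inverted dict has its length in the table (and is nonempty)
theorem key_len (p : List Char) (e : String)
    (h : PySem.Dict.get? bPatternToEntity p = some e) :
    (p.length : Int) ∈ bLengths ∧ 1 ≤ p.length := by
  have hm := PySem.Dict.mem_items_of_get?_eq_some bPatternToEntity h
  rw [bLengths_eq]
  fin_cases hm <;> decide

-- the dict lookup succeeds with value e exactly on (the code points of) A's patterns for e
theorem key_equiv (p : List Char) (e : String) :
    PySem.Dict.get? bPatternToEntity p = some e ↔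
      ∃ ep ∈ aEntityPatterns, ep.1 = e ∧ ∃ pat ∈ ep.2, pat.toList = p := by
  constructor
  · intro h
    have hm := PySem.Dict.mem_items_of_get?_eq_some bPatternToEntity h
    fin_cases hm <;> decide
  · rintro ⟨ep, hep, he, pat, hpat, hp⟩
    subst he hp
    fin_cases hep <;> fin_cases hpat <;> decide

-- membership after B's inner (break-carrying) length loop, valid for any
-- nondecreasing length list: despite the break, a hit exists iff some
-- in-bounds length gives a dict hit
theorem mem_bInner (s : List Char) (n i : Int) (m : PySem.Set String) (e : String)
    (Ls : List Int) (hs : Ls.Pairwise (· ≤ ·)) :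
    e ∈ bInner s n i m Ls ↔ e ∈ m ∨
      ∃ L ∈ Ls, i + L ≤ n ∧
        PySem.Dict.get? bPatternToEntity (PySem.List.slice s (some i) (some (i + L))) = some e := by
  induction Ls generalizing m with
  | nil => simp [bInner]
  | cons L Ls ih =>
    rcases List.pairwise_cons.mp hs with ⟨hle, htl⟩
    rw [bInner]
    by_cases hb : n < i + L
    · rw [if_pos hb]
      constructor
      · intro h; exact Or.inl h
      · rintro (h | ⟨L', hL', hble, _⟩)
        · exact h
        · rcases List.mem_cons.mp hL' with rfl | hL'
          · omega
          · have := hle L' hL'; omega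
    · rw [if_neg hb]
      rcases hget : PySem.Dict.get? bPatternToEntity
          (PySem.List.slice s (some i) (some (i + L))) with _ | v
      · rw [ih m htl]
        constructor
        · rintro (h | ⟨L', hL', h1, h2⟩)
          · exact Or.inl h
          · exact Or.inr ⟨L', List.mem_cons_of_mem _ hL', h1, h2⟩
        · rintro (h | ⟨L', hL', h1, h2⟩)
          · exact Or.inl h
          · rcases List.mem_cons.mp hL' with rfl | hL'
            · rw [hget] at h2; exact absurd h2 (by simp)
            · exact Or.inr ⟨L', hL', h1, h2⟩
      · rw [ih (PySem.Set.add m v) htl]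
        rw [PySem.Set.mem_add]
        constructor
        · rintro ((h | rfl) | ⟨L', hL', h1, h2⟩)
          · exact Or.inl h
          · exact Or.inr ⟨L, List.mem_cons_self, by omega, hget⟩
          · exact Or.inr ⟨L', List.mem_cons_of_mem _ hL', h1, h2⟩
        · rintro (h | ⟨L', hL', h1, h2⟩)
          · exact Or.inl (Or.inl h)
          · rcases List.mem_cons.mp hL' with rfl | hL'
            · rw [hget] at h2
              exact Or.inl (Or.inr (Option.some_injective _ h2).symm)
            · exact Or.inr ⟨L', hL', h1, h2⟩

-- the per-column hit condition B accumulates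
def bColHit (e : String) (c : String) : Prop :=
  ∃ i ∈ PySem.List.pyRange 0 (c.toList.length : Int), ∃ L ∈ bLengths, i + L ≤ (c.toList.length : Int) ∧
    PySem.Dict.get? bPatternToEntity (PySem.List.slice c.toList (some i) (some (i + L))) = some e

theorem mem_bScanCol (m : PySem.Set String) (c : String) (e : String) :
    e ∈ bScanCol m c ↔ e ∈ m ∨ bColHit e c := by
  have hs : bLengths.Pairwise (· ≤ ·) := by rw [bLengths_eq]; decide
  show e ∈ (PySem.List.pyRange 0 ((c.toList.length : Int))).foldl
      (fun m i => bInner c.toList (c.toList.length : Int) i m bLengths) m ↔ _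
  unfold bColHit
  generalize PySem.List.pyRange 0 ((c.toList.length : Int)) = idxs
  induction idxs generalizing m with
  | nil => simp
  | cons i idxs ih =>
    simp only [List.foldl_cons, ih, mem_bInner _ _ _ _ _ _ hs]
    constructor
    · rintro ((h | ⟨L, h1, h2, h3⟩) | ⟨i', hi', h⟩)
      · exact Or.inl h
      · exact Or.inr ⟨i, List.mem_cons_self, L, h1, h2, h3⟩
      · exact Or.inr ⟨i', List.mem_cons_of_mem _ hi', h⟩
    · rintro (h | ⟨i', hi', h⟩)
      · exact Or.inl (Or.inl h)
      · rcases List.mem_cons.mp hi' with rfl | hi'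
        · exact Or.inl (Or.inr h)
        · exact Or.inr ⟨i', hi', h⟩

theorem mem_foldl_bScan (cols : List String) (m : PySem.Set String) (e : String) :
    e ∈ cols.foldl bScanCol m ↔ e ∈ m ∨ ∃ c ∈ cols, bColHit e c := by
  induction cols generalizing m with
  | nil => simp
  | cons c cs ih =>
    simp only [List.foldl_cons, ih, mem_bScanCol]
    constructor
    · rintro ((h | h) | ⟨c', hc', h⟩)
      · exact Or.inl h
      · exact Or.inr ⟨c, List.mem_cons_self, h⟩
      · exact Or.inr ⟨c', List.mem_cons_of_mem _ hc', h⟩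
    · rintro (h | ⟨c', hc', h⟩)
      · exact Or.inl (Or.inl h)
      · rcases List.mem_cons.mp hc' with rfl | hc'
        · exact Or.inl (Or.inr h)
        · exact Or.inr ⟨c', hc', h⟩

-- the substring-enumeration hit equals 'some dict key is an infix of the column'
theorem bColHit_iff (e : String) (c : String) :
    bColHit e c ↔ ∃ p : List Char, PySem.Dict.get? bPatternToEntity p = some e ∧ p <:+: c.toList := by
  constructor
  · rintro ⟨i, hi, L, hL, hle, hget⟩
    rcases PySem.List.mem_pyRange_one.mp hi with ⟨hi0, hilt⟩
    have hL0 : 0 < L := by rw [bLengths_eq] at hL; fin_cases hL <;> omega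
    refine ⟨PySem.List.slice c.toList (some i) (some (i + L)), hget, ?_⟩
    have hia : i = ((i.toNat : Nat) : Int) := by omega
    have hLa : L = ((L.toNat : Nat) : Int) := by omega
    rw [hia, hLa, PySem.List.slice_natCast_add]
    exact ((List.take_prefix _ _).isInfix).trans ((List.drop_suffix _ _).isInfix)
  · rintro ⟨p, hget, u, v, huv⟩
    rcases key_len p e hget with ⟨hlen, hpos⟩
    have hlc : u.length + (p.length + v.length) = c.toList.length := by
      simpa using congrArg List.length huv
    refine ⟨(u.length : Int), ?_, (p.length : Int), hlen, ?_, ?_⟩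
    · rw [PySem.List.mem_pyRange_one]
      omega
    · omega
    · rw [PySem.List.slice_natCast_add, ← huv, List.append_assoc, List.drop_left,
        List.take_left, hget]

-- entity names in A's table are distinct
theorem name_inj : ∀ ep ∈ aEntityPatterns, ∀ ep' ∈ aEntityPatterns, ep.1 = ep'.1 → ep = ep' := by
  decide

-- per entry of A's table, B's accumulated hit equals A's any-pattern condition
theorem per_entity (cols : List String) (ep : String × List String)
    (hep : ep ∈ aEntityPatterns) :
    ep.2.any (fun p => aColsHit p cols) =
      PySem.Set.contains (cols.foldl bScanCol PySem.Set.empty) ep.1 := by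
  rw [Bool.eq_iff_iff, PySem.Set.contains_iff, mem_foldl_bScan]
  simp only [PySem.Set.empty, List.not_mem_nil, false_or]
  constructor
  · intro h
    rcases List.any_eq_true.mp h with ⟨pat, hpat, hhit⟩
    rw [aColsHit_eq_any] at hhit
    rcases List.any_eq_true.mp hhit with ⟨c, hc, hin⟩
    refine ⟨c, hc, (bColHit_iff ep.1 c).mpr ⟨pat.toList, ?_, ?_⟩⟩
    · exact (key_equiv pat.toList ep.1).mpr ⟨ep, hep, rfl, pat, hpat, rfl⟩
    · exact (PySem.Str.isIn_iff_infix pat c).mp hin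
  · rintro ⟨c, hc, hhit⟩
    rcases (bColHit_iff ep.1 c).mp hhit with ⟨p, hget, hinf⟩
    rcases (key_equiv p ep.1).mp hget with ⟨ep', hep', he', pat, hpat, hp⟩
    have : ep' = ep := name_inj ep' hep' ep hep he'
    subst this
    refine List.any_eq_true.mpr ⟨pat, hpat, ?_⟩
    rw [aColsHit_eq_any]
    refine List.any_eq_true.mpr ⟨c, hc, ?_⟩
    rw [PySem.Str.isIn_iff_infix, hp]
    exact hinf

-- filtering pairs then projecting = projecting then filtering, when the predicates agree
theorem filter_map_fst {α β : Type} (entries : List (α × β)) (f : α × β → Bool)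
    (g : α → Bool) (h : ∀ ep ∈ entries, f ep = g ep.1) :
    (entries.filter f).map Prod.fst = (entries.map Prod.fst).filter g := by
  induction entries with
  | nil => rfl
  | cons ep rest ih =>
    have ih' := ih (fun q hq => h q (List.mem_cons_of_mem _ hq))
    simp only [List.filter_cons, List.map_cons]
    rw [h ep List.mem_cons_self]
    by_cases hg : g ep.1 = true
    · simp [hg, ih']
    · simp only [Bool.not_eq_true] at hg
      simp [hg, ih']

-- ===== VERDICT (by name: the statement is the Claim_ definition above) =====
theorem detect_entities_spec : Claim_equal_detect_entities := by
  intro columns _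
  show detect_entities columns = detect_entities_alt columns
  rw [detect_entities,
    aFold_eq columns aEntityPatterns [] (fun ep _ => List.not_mem_nil) (by decide)]
  simp only [detect_entities_alt, List.nil_append]
  have horder : bEntityOrder = aEntityPatterns.map Prod.fst := by decide
  rw [horder]
  exact filter_map_fst aEntityPatterns _ _ (fun ep hep => per_entity columns ep hep)
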